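-- pv_equiv track=rewrite | github.com/avniproject/avni-ai | dify/knowledge_base/tools/generate_kb.py | _normalize_headings
-- ===== SOURCE A (Python) =====
-- def _normalize_headings(text):
--     """Ensure content headings start at ## (not #)."""
--     lines = text.split("\n")
--     result = []
--     for line in lines:
--         # Don't touch lines inside code blocks
--         if line.startswith("# ") and not line.startswith("## "):
--             # Convert top-level headings to ##
--             result.append("#" + line)
--         else:
--             result.append(line)
--     return "\n".join(result)
-- ===== SOURCE B (Python) =====
-- def _normalize_headings(text):
--     """Ensure content headings start at ## (not #)."""
--     out = []
--     at_start = True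
--     n = len(text)
--     for i in range(n):
--         c = text[i]
--         if at_start and c == "#" and i + 1 < n and text[i + 1] == " ":
--             out.append("#")
--         out.append(c)
--         at_start = c == "\n"
--     return "".join(out)
-- ===== Notes on version B (the rewrite author's own statement) =====
-- stated objective: alternative
-- what changed: Replaces the split/per-line loop/append/join with a single character-level scan that tracks line starts and inserts the extra hash where a top-level heading begins (the redundant double-hash guard drops out).
import Mathlib
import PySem

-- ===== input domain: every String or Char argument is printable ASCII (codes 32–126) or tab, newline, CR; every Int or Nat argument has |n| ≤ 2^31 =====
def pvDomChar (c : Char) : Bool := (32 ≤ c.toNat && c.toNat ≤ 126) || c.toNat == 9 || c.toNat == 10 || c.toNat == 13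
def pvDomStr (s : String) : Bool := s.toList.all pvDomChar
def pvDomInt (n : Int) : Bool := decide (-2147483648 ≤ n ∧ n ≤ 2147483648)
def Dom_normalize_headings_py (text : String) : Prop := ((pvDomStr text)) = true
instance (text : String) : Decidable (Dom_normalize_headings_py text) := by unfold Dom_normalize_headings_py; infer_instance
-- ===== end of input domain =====

-- B replaces A's split/per-line-loop/join with a single character-level scan over the text (alternative decomposition, same cost).

-- ===== PORT A =====
-- literal transliteration of A: split on "\n", loop appending the (possibly '#'-prefixed) line, join with "\n"
def normalize_headings_py (text : String) : String :=
  let lines := PySem.Chars.splitOn text.toList ['\n']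
  let result := lines.foldl (fun r line =>
    if PySem.Chars.startswith line ['#', ' '] && !PySem.Chars.startswith line ['#', '#', ' '] then
      r ++ [('#' : Char) :: line]
    else
      r ++ [line]) []
  String.ofList (PySem.Chars.join ['\n'] result)

-- ===== PORT B =====
-- B's for-loop over the characters with its running at_start flag; rest.head? is text[i+1]
def nhScan : List Char → Bool → List Char
  | [], _ => []
  | c :: rest, atStart =>
    (if atStart && (c == '#') && (rest.head? == some ' ') then ['#'] else []) ++
      (c :: nhScan rest (c == '\n'))

def normalize_headings_py_alt (text : String) : String :=
  String.ofList (nhScan text.toList true)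

-- ===== PRECONDITION & SPEC =====
def Spec_normalize_headings_py (text : String) (out : String) : Prop := out = normalize_headings_py_alt text
instance (text : String) (out : String) : Decidable (Spec_normalize_headings_py text out) := by unfold Spec_normalize_headings_py; infer_instance

-- ===== CLAIM (what is proved, stated in full; the proofs are below) =====
def Claim_equal_normalize_headings_py : Prop := ∀ (text : String), Dom_normalize_headings_py text → Spec_normalize_headings_py text (normalize_headings_py text)

-- ===== LEMMAS AND PROOFS =====

-- structural reformulation of PySem.Chars.splitOn for the single-char separator '\n'
def pvSplit (cur : List Char) : List Char → List (List Char)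
  | [] => [cur.reverse]
  | c :: rest => if c = '\n' then cur.reverse :: pvSplit [] rest else pvSplit (c :: cur) rest

-- A's per-line transformation
def pvLine (line : List Char) : List Char :=
  if PySem.Chars.startswith line ['#', ' '] && !PySem.Chars.startswith line ['#', '#', ' '] then
    ('#' : Char) :: line
  else line

theorem splitOn_go_eq (fuel : Nat) : ∀ (l cur : List Char) (accs : List (List Char)),
    l.length < fuel →
    PySem.Chars.splitOn.go ['\n'] fuel l cur accs = accs.reverse ++ pvSplit cur l := by
  induction fuel with
  | zero => intro l cur accs h; omega
  | succ n ih =>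
    intro l cur accs h
    cases l with
    | nil => simp [PySem.Chars.splitOn.go, pvSplit]
    | cons c rest =>
      simp only [List.length_cons] at h
      simp only [PySem.Chars.splitOn.go, List.isPrefixOf, Bool.and_true, List.length_cons,
        List.length_nil, Nat.zero_add, List.drop_one, List.tail_cons, pvSplit]
      by_cases hc : c = '\n'
      · simp only [hc, beq_self_eq_true, if_pos]
        rw [ih rest [] (cur.reverse :: accs) (by omega)]
        simp
      · have hb : ('\n' == c) = false := by simp [Ne.symm hc]
        simp only [hb, Bool.false_eq_true, if_false, if_neg hc]
        exact ih rest (c :: cur) accs (by omega)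

theorem splitOn_eq (cs : List Char) : PySem.Chars.splitOn cs ['\n'] = pvSplit [] cs := by
  have := splitOn_go_eq (cs.length + 1) cs [] [] (by omega)
  simpa [PySem.Chars.splitOn] using this

theorem foldl_lines (xs : List (List Char)) (acc : List (List Char)) :
    xs.foldl (fun r line =>
      if PySem.Chars.startswith line ['#', ' '] && !PySem.Chars.startswith line ['#', '#', ' '] then
        r ++ [('#' : Char) :: line]
      else r ++ [line]) acc = acc ++ xs.map pvLine := by
  induction xs generalizing acc with
  | nil => simp
  | cons x xs ih =>
    simp only [List.foldl_cons, List.map_cons]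
    rw [show (if PySem.Chars.startswith x ['#', ' '] && !PySem.Chars.startswith x ['#', '#', ' '] then
        acc ++ [('#' : Char) :: x] else acc ++ [x]) = acc ++ [pvLine x] from by
      unfold pvLine; split <;> rfl]
    rw [ih]; simp

-- within a line (no '\n'), the scan with at_start = false just copies
theorem nhScan_copy (l : List Char) (rest : List Char) (h : ∀ c ∈ l, c ≠ '\n') :
    nhScan (l ++ rest) false = l ++ nhScan rest false := by
  induction l with
  | nil => rfl
  | cons c l ih =>
    have hc : (c == '\n') = false := by simpa using h c (by simp)
    simp [nhScan, hc, ih (fun d hd => h d (by simp [hd]))]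

-- at a line start, the scan performs exactly A's per-line transformation
theorem nhScan_start (line tail : List Char) (h : ∀ c ∈ line, c ≠ '\n')
    (hne : line ≠ []) (ht : tail.head? ≠ some ' ') :
    nhScan (line ++ tail) true = pvLine line ++ nhScan tail false := by
  match line, hne with
  | c :: t, _ =>
    have hc : (c == '\n') = false := by simpa using h c (by simp)
    cases t with
    | nil =>
      have hcond : ((c == '#') && (tail.head? == some ' ')) = false := by
        cases hh : tail.head? == some ' ' with
        | true => exact absurd (by simpa using hh) ht
        | false => simp
      simp only [List.cons_append, List.nil_append, nhScan, Bool.true_and, hcond, hc,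
        Bool.false_eq_true, if_false, List.nil_append]
      simp [pvLine, PySem.Chars.startswith, List.isPrefixOf]
    | cons d t' =>
      have hd : (d == '\n') = false := by simpa using h d (by simp)
      have hcopy' : nhScan (t' ++ tail) false = t' ++ nhScan tail false :=
        nhScan_copy t' tail (fun e he => h e (by simp [he]))
      by_cases hcd : c = '#' ∧ d = ' '
      · obtain ⟨rfl, rfl⟩ := hcd
        simp [nhScan, pvLine, PySem.Chars.startswith, List.isPrefixOf, hcopy']
      · have hcond : ((c == '#') && (((d :: t') ++ tail).head? == some ' ')) = false := by
          rcases (not_and_or.mp hcd) with hx | hx <;> simp [hx]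
        simp only [List.cons_append, nhScan, Bool.true_and, hc, hd, hcopy']
        have hpv : pvLine (c :: d :: t') = c :: d :: t' := by
          rcases (not_and_or.mp hcd) with hx | hx <;>
            simp [pvLine, PySem.Chars.startswith, List.isPrefixOf, Ne.symm hx]
        rw [hpv]
        simp [hcond]
        exact fun h1 h2 => hcd ⟨h1, h2⟩

theorem intercalate_one (sep x : List Char) : sep.intercalate [x] = x := by
  simp [List.intercalate]

theorem intercalate_two (sep x y : List Char) (ys : List (List Char)) :
    sep.intercalate (x :: y :: ys) = x ++ (sep ++ sep.intercalate (y :: ys)) := by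
  simp [List.intercalate, List.intersperse]

theorem nhScan_line (line : List Char) (h : ∀ c ∈ line, c ≠ '\n') :
    nhScan line true = pvLine line := by
  cases hl : line with
  | nil => simp [nhScan, pvLine, PySem.Chars.startswith, List.isPrefixOf]
  | cons c t =>
    have := nhScan_start (c :: t) [] (hl ▸ h) (by simp) (by simp)
    simpa [nhScan] using this

theorem nhScan_line_nl (line rest : List Char) (h : ∀ c ∈ line, c ≠ '\n') :
    nhScan (line ++ '\n' :: rest) true = pvLine line ++ '\n' :: nhScan rest true := by
  have hnl : ∀ b, nhScan ('\n' :: rest) b = '\n' :: nhScan rest true := by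
    intro b; simp [nhScan]
  cases hl : line with
  | nil => simp [hnl, pvLine, PySem.Chars.startswith, List.isPrefixOf]
  | cons c t =>
    rw [nhScan_start (c :: t) ('\n' :: rest) (hl ▸ h) (by simp) (by simp), hnl]

theorem main_lemma (lines : List (List Char))
    (h : ∀ line ∈ lines, ∀ c ∈ line, c ≠ '\n') :
    nhScan (List.intercalate ['\n'] lines) true = List.intercalate ['\n'] (lines.map pvLine) := by
  induction lines with
  | nil => simp [List.intercalate, nhScan]
  | cons l ls ih =>
    cases ls with
    | nil =>
      simp only [List.map_cons, List.map_nil, intercalate_one]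
      exact nhScan_line l (h l (by simp))
    | cons l2 ls' =>
      rw [List.map_cons, intercalate_two, List.map_cons, intercalate_two, ← List.map_cons]
      have hstep := nhScan_line_nl l (List.intercalate ['\n'] (l2 :: ls')) (h l (by simp))
      simp only [List.append_assoc, List.singleton_append] at hstep ⊢
      rw [hstep, ih (fun li hli => h li (by simp [hli]))]

theorem pvSplit_ne_nil (cs : List Char) : ∀ cur, pvSplit cur cs ≠ [] := by
  induction cs with
  | nil => intro cur; simp [pvSplit]
  | cons c rest ih => intro cur; simp only [pvSplit]; split <;> simp [ih]

theorem pvSplit_join (cs : List Char) : ∀ cur, List.intercalate ['\n'] (pvSplit cur cs) = cur.reverse ++ cs := by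
  induction cs with
  | nil => intro cur; simp [pvSplit, intercalate_one]
  | cons c rest ih =>
    intro cur
    simp only [pvSplit]
    by_cases hc : c = '\n'
    · obtain ⟨p, ps, hps⟩ : ∃ p ps, pvSplit [] rest = p :: ps := by
        cases hx : pvSplit [] rest with
        | nil => exact absurd hx (pvSplit_ne_nil rest [])
        | cons p ps => exact ⟨p, ps, rfl⟩
      rw [if_pos hc, hps, intercalate_two, ← hps, ih []]
      simp [hc]
    · rw [if_neg hc, ih (c :: cur)]
      simp

theorem pvSplit_no_nl (cs : List Char) : ∀ cur, (∀ c ∈ cur, c ≠ '\n') →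
    ∀ line ∈ pvSplit cur cs, ∀ c ∈ line, c ≠ '\n' := by
  induction cs with
  | nil =>
    intro cur hcur line hline
    simp [pvSplit] at hline
    subst hline
    intro c hc
    exact hcur c (by simpa using hc)
  | cons c rest ih =>
    intro cur hcur line hline
    by_cases hc : c = '\n'
    · simp only [pvSplit, if_pos hc] at hline
      rcases List.mem_cons.mp hline with rfl | hmem
      · intro d hd; exact hcur d (by simpa using hd)
      · exact ih [] (by simp) line hmem
    · simp only [pvSplit, if_neg hc] at hline
      exact ih (c :: cur) (by intro d hd; rcases List.mem_cons.mp hd with rfl | h2; exact hc; exact hcur d h2) line hline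

-- ===== VERDICT (by name: the statement is the Claim_ definition above) =====
theorem normalize_headings_py_spec : Claim_equal_normalize_headings_py := by
  intro text _
  unfold Spec_normalize_headings_py normalize_headings_py normalize_headings_py_alt
  simp only [splitOn_eq, foldl_lines, List.nil_append, PySem.Chars.join]
  have h := main_lemma (pvSplit [] text.toList) (pvSplit_no_nl text.toList [] (by simp))
  rw [pvSplit_join text.toList []] at h
  simp only [List.reverse_nil, List.nil_append] at h
  rw [← h]
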